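-- pv_equiv track=rewrite | github.com/J-AugustoManzano/Validacao-de-Dados | Digito Verificador/Damm/DV Gerador e Verificador/damm.py | remover_mascara
-- ===== SOURCE A (Python) =====
-- def remover_mascara(NUMERO):
--     NUMERO_SEM_MASCARA_DV = ''
--     encontrou_primeiro_digito = False
--
--     for char in NUMERO:
--         if char == '.':
--             encontrou_primeiro_digito = True
--         elif char.isdigit():
--             if not encontrou_primeiro_digito and char == '0':
--                 continue
--             NUMERO_SEM_MASCARA_DV += char
--
--     return NUMERO_SEM_MASCARA_DV
-- ===== SOURCE B (Python) =====
-- def remover_mascara(NUMERO):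
--     before, _, after = NUMERO.partition('.')
--     return (''.join(c for c in before if c.isdigit() and c != '0')
--             + ''.join(c for c in after if c.isdigit()))
-- ===== Notes on version B (the rewrite author's own statement) =====
-- stated objective: simpler
-- what changed: Replaces the stateful single loop with a boolean flag by a stateless decomposition: partition the string at the first dot, then filter nonzero digits from the prefix and all digits from the suffix.
import Mathlib
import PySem

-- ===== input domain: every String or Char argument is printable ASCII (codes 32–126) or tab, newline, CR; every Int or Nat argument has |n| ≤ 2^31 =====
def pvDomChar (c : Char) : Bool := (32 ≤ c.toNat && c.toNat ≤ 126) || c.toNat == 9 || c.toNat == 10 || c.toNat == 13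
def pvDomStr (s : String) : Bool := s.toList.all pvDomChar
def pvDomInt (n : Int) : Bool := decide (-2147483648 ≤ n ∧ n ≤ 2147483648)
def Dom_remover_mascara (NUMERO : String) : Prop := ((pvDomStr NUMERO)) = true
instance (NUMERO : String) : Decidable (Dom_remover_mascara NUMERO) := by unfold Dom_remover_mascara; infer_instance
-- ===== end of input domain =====

-- B replaces A's stateful flag loop by a stateless decomposition: split at the first dot, filter nonzero digits before it, all digits after it.

-- ===== PORT A =====
-- A's loop body: state = (encontrou_primeiro_digito, NUMERO_SEM_MASCARA_DV as a char list)
def pvStepA (st : Bool × List Char) (c : Char) : Bool × List Char :=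
  if c = '.' then (true, st.2)
  else if PySem.Chars.isdigit c then
    if !st.1 && c = '0' then st else (st.1, st.2 ++ [c])
  else st

-- A's single for-loop over the characters, flag initially False, accumulator initially ''
def remover_mascara (NUMERO : String) : String :=
  let r := NUMERO.toList.foldl pvStepA (false, [])
  String.ofList r.2

-- ===== PORT B =====
-- partition at the first '.' (takeWhile / dropWhile-then-drop-1 = str.partition for a 1-char separator), then two filters
def remover_mascara_alt (NUMERO : String) : String :=
  let cs := NUMERO.toList
  let before := cs.takeWhile (· ≠ '.')
  let after := (cs.dropWhile (· ≠ '.')).drop 1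
  String.ofList (before.filter (fun c => PySem.Chars.isdigit c && c ≠ '0')
             ++ after.filter (fun c => PySem.Chars.isdigit c))

-- ===== PRECONDITION & SPEC =====
def Spec_remover_mascara (NUMERO : String) (out : String) : Prop := out = remover_mascara_alt NUMERO
instance (NUMERO : String) (out : String) : Decidable (Spec_remover_mascara NUMERO out) := by unfold Spec_remover_mascara; infer_instance

-- ===== CLAIM (what is proved, stated in full; the proofs are below) =====
def Claim_equal_remover_mascara : Prop := ∀ (NUMERO : String), Dom_remover_mascara NUMERO → Spec_remover_mascara NUMERO (remover_mascara NUMERO)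

-- ===== LEMMAS AND PROOFS =====

lemma foldl_stepA_true (cs : List Char) (acc : List Char) :
    cs.foldl pvStepA (true, acc) = (true, acc ++ cs.filter (fun c => PySem.Chars.isdigit c)) := by
  induction cs generalizing acc with
  | nil => simp
  | cons c cs ih =>
    by_cases hdot : c = '.'
    · simp [pvStepA, hdot, ih, PySem.Chars.isdigit]
    · by_cases hd : PySem.Chars.isdigit c
      · simp [List.foldl_cons, pvStepA, hdot, hd, ih, List.filter_cons]
      · simp [List.foldl_cons, pvStepA, hdot, hd, ih, List.filter_cons]

lemma foldl_stepA_false (cs : List Char) (acc : List Char) :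
    (cs.foldl pvStepA (false, acc)).2
      = acc ++ (cs.takeWhile (· ≠ '.')).filter (fun c => PySem.Chars.isdigit c && c ≠ '0')
             ++ ((cs.dropWhile (· ≠ '.')).drop 1).filter (fun c => PySem.Chars.isdigit c) := by
  induction cs generalizing acc with
  | nil => simp
  | cons c cs ih =>
    by_cases hdot : c = '.'
    · simp [List.foldl_cons, pvStepA, hdot, foldl_stepA_true, List.dropWhile_cons, List.takeWhile_cons]
    · by_cases hd : PySem.Chars.isdigit c
      · by_cases h0 : c = '0'
        · simp [List.foldl_cons, pvStepA, hdot, hd, h0, ih, List.dropWhile_cons,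
                List.takeWhile_cons, List.filter_cons]
        · simp [List.foldl_cons, pvStepA, hdot, hd, h0, ih, List.dropWhile_cons,
                List.takeWhile_cons, List.filter_cons]
      · have h0 : c ≠ '0' := by
          intro h; subst h; simp [PySem.Chars.isdigit] at hd
        simp [List.foldl_cons, pvStepA, hdot, hd, h0, ih, List.dropWhile_cons,
              List.takeWhile_cons, List.filter_cons]

-- ===== VERDICT (by name: the statement is the Claim_ definition above) =====
theorem remover_mascara_spec : Claim_equal_remover_mascara := by
  intro NUMERO _
  unfold Spec_remover_mascara remover_mascara remover_mascara_alt
  simp [foldl_stepA_false]
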